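-- pv_equiv track=rewrite | github.com/5onchangwoo/study-python | programmers/lv2/괄호 변환.py | splitPoint
-- ===== SOURCE A (Python) =====
-- def splitPoint(p):
--     score = 0
--     for i in range(len(p)):
--         if p[i] == "(":
--             score += 1
--         else:
--             score -= 1
--         if score == 0:
--             return i + 1
-- ===== SOURCE B (Python) =====
-- def splitPoint(p):
--     # Pass 1: build the full running-balance table.
--     acc = []
--     s = 0
--     for c in p:
--         s += 1 if c == "(" else -1
--         acc.append(s)
--     # Pass 2: first position where the balance hits zero.
--     return next((i + 1 for i, v in enumerate(acc) if v == 0), None)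
-- ===== Notes on version B (the rewrite author's own statement) =====
-- stated objective: idiomatic
-- what changed: B splits the work into two passes -- build the full running-balance table, then search it for the first zero with next(enumerate(...)) -- instead of A's single inline early-return loop.
-- outside the precondition, e.g. on splitPoint(''): A returns None, B returns None; on splitPoint('('): A returns None, B returns None; on splitPoint('(('): A returns None, B returns None
import Mathlib
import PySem

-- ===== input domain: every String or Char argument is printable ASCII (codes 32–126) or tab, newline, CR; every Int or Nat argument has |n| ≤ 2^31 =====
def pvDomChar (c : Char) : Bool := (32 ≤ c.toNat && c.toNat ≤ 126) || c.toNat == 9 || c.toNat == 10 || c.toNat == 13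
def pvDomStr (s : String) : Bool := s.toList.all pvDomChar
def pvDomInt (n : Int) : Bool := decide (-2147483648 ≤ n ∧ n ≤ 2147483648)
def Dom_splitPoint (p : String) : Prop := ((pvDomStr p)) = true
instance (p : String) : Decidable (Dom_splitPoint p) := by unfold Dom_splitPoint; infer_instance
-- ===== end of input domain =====

-- B rewrites A's inline early-return loop as two passes (build the running-balance table, then find its first zero); idiomatic decomposition, same cost.
-- Pre_ excludes inputs on which A returns None (no nonempty prefix balances), which is not an Int.


-- ===== PORT A =====
-- A's for-loop over indices with early return, as structural recursion over the characters
-- carrying the index i and the running score. Where Python A returns None (loop ends), the port returns 0;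
-- Pre_ excludes those inputs.
def splitPointGo : List Char → Int → Int → Int
  | [], _, _ => 0
  | c :: rest, i, score =>
    let score' := if c = '(' then score + 1 else score - 1
    if score' = 0 then i + 1 else splitPointGo rest (i + 1) score'

def splitPoint (p : String) : Int := splitPointGo p.toList 0 0

-- ===== PORT B =====
-- Source B pass 1: the running-balance table (append-loop over the characters)
def accTable : List Int → Int → List Int
  | [], _ => []
  | x :: r, s => (s + x) :: accTable r (s + x)

-- Source B pass 2: next((i+1 for i, v in enumerate(acc) if v == 0), None); None ↦ 0 (excluded by Pre_)
def splitPoint_alt (p : String) : Int :=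
  let steps := p.toList.map (fun c => if c = '(' then (1 : Int) else -1)
  let acc := accTable steps 0
  match acc.findIdx? (· == 0) with
  | some i => (i : Int) + 1
  | none => 0

-- ===== PRECONDITION & SPEC =====
-- Pre_: some nonempty prefix is balanced (as many '(' as other characters), i.e. exactly the
-- inputs on which Python A returns an int; elsewhere A returns None, which is not an Int.
def Pre_splitPoint (p : String) : Prop :=
  ∃ k ∈ Finset.Icc 1 p.toList.length, 2 * ((p.toList.take k).count '(') = k
instance (p : String) : Decidable (Pre_splitPoint p) := by unfold Pre_splitPoint; infer_instance
def pvWitness_splitPoint : String := "()"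

def Spec_splitPoint (p : String) (out : Int) : Prop := out = splitPoint_alt p
instance (p : String) (out : Int) : Decidable (Spec_splitPoint p out) := by unfold Spec_splitPoint; infer_instance

-- ===== CLAIM (what is proved, stated in full; the proofs are below) =====
def Claim_equal_splitPoint : Prop := ∀ (p : String), Dom_splitPoint p → Pre_splitPoint p → Spec_splitPoint p (splitPoint p)

-- ===== LEMMAS AND PROOFS =====
-- Loop invariant: A's loop from offset i with score s equals the search of B's table built from s.
theorem splitPointGo_eq_table (l : List Char) :
    ∀ (s i : Int),
      splitPointGo l i s =
        match (accTable (l.map (fun c => if c = '(' then (1 : Int) else -1)) s).findIdx? (· == 0) with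
        | some k => i + (k : Int) + 1
        | none => 0 := by
  induction l with
  | nil => intro s i; simp [splitPointGo, accTable, List.findIdx?, List.findIdx?.go]
  | cons c r ih =>
    intro s i
    simp only [List.map, accTable, List.findIdx?_cons, splitPointGo]
    by_cases h : (if c = '(' then s + 1 else s - 1) = 0
    · have hx : s + (if c = '(' then (1 : Int) else -1) = 0 := by
        split_ifs at h ⊢ <;> omega
      simp [h, hx]
    · have hx : ¬ (s + (if c = '(' then (1 : Int) else -1) = 0) := by
        split_ifs at h ⊢ <;> omega
      have hs : (if c = '(' then s + 1 else s - 1) = s + (if c = '(' then (1 : Int) else -1) := by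
        split_ifs <;> ring
      simp only [beq_iff_eq, if_neg hx, hs]
      rw [ih]
      cases hfind : (accTable (r.map (fun c => if c = '(' then (1 : Int) else -1))
          (s + (if c = '(' then (1 : Int) else -1))).findIdx? (· == 0) with
      | none => simp
      | some k =>
        simp only [Option.map_some]
        push_cast
        ring

-- ===== VERDICT (by name: the statement is the Claim_ definition above) =====
theorem splitPoint_spec : Claim_equal_splitPoint := by
  intro p _ _
  unfold Spec_splitPoint splitPoint splitPoint_alt
  rw [splitPointGo_eq_table]
  cases hfind : (accTable (p.toList.map (fun c => if c = '(' then (1 : Int) else -1)) 0).findIdx? (· == 0) with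
  | none => simp [hfind]
  | some k => simp [hfind]
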